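-- pv_equiv track=rewrite | github.com/matuspintek-boop/ib111 | 05/p3_sublist.py | largest_common_sublist_sum
-- ===== SOURCE A (Python) =====
-- def find_sequence(i: int, j: int, max_list: list[int],
--                   min_list: list[int]) -> int:
--     sum_: int = 0
--     highest: int = 0
--
--     while i < len(max_list) \
--         and j < len(min_list) \
--             and max_list[i] == min_list[j]:
--         sum_ += max_list[i]
--         i += 1
--         j += 1
--         highest = max(sum_, highest)
--
--     return highest
--
-- def largest_common_sublist_sum(left: list[int], right: list[int]) -> int:
--     largest_sum: int = 0
--
--     max_list: list[int] = left if len(left) >= len(right) else right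
--     min_list: list[int] = right if len(right) <= len(left) else left
--
--     for i in range(len(max_list)):
--         value = max_list[i]
--         for j in range(len(min_list)):
--             if min_list[j] == value:
--                 candidate: int = find_sequence(i, j, max_list, min_list)
--                 if candidate > largest_sum:
--                     largest_sum = candidate
--
--     return largest_sum
-- ===== SOURCE B (Python) =====
-- def largest_common_sublist_sum(left, right):
--     # O(len(left)*len(right)) dynamic programming: dp cell (i, j) holds the best
--     # (clamped at 0) sum of a common run starting at left[i], right[j]; the table is
--     # filled bottom-up row by row so nothing is recomputed.
--     answer = 0
--     below = [0] * (len(right) + 1)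
--     for x in reversed(left):
--         row = []
--         for y, b in zip(right, below[1:]):
--             v = max(0, x + b) if x == y else 0
--             if v > answer:
--                 answer = v
--             row.append(v)
--         row.append(0)
--         below = row
--     return answer
-- ===== Notes on version B (the rewrite author's own statement) =====
-- stated objective: faster
-- what changed: Replaces the triple loop that re-walks every matching diagonal run (find_sequence from every start cell) with a bottom-up O(n*m) dynamic program: one table row per element of left, each cell derived from the diagonal neighbour below-right, tracking the global maximum.
import Mathlib
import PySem

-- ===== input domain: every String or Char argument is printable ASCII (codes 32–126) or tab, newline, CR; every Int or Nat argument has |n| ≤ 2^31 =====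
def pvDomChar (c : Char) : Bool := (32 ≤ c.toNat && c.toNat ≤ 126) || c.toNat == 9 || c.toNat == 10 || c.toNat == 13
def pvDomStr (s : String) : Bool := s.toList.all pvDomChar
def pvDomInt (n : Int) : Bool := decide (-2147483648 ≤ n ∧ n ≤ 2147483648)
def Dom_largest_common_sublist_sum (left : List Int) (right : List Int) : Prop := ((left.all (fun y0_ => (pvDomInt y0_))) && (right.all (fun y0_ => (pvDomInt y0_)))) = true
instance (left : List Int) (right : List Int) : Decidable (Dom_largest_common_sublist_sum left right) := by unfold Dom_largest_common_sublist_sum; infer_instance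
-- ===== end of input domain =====

-- B replaces A's triple loop (re-walking every matching diagonal run from every start cell)
-- with a bottom-up dynamic-programming table filled row by row: objective = faster.


-- ===== PORT A =====
-- while-loop of find_sequence; the indices i, j are only ever reached with 0 ≤ i, j
-- (they start at range(len) values and are incremented), so they are Nat here and
-- list indexing is List.getD, exact because guarded by i < length ∧ j < length.
def findSeqLoop (i j : Nat) (maxl minl : List Int) (sum_ highest : Int) : Int :=
  if i < maxl.length ∧ j < minl.length ∧ maxl.getD i 0 = minl.getD j 0 then
    findSeqLoop (i + 1) (j + 1) maxl minl (sum_ + maxl.getD i 0)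
      (max (sum_ + maxl.getD i 0) highest)
  else highest
termination_by maxl.length - i
decreasing_by omega

def find_sequence (i j : Nat) (maxl minl : List Int) : Int :=
  findSeqLoop i j maxl minl 0 0

-- for i in range(len(...)) yields 0,…,len-1, ported as List.range
def largest_common_sublist_sum (left : List Int) (right : List Int) : Int :=
  let maxl := if left.length ≥ right.length then left else right
  let minl := if right.length ≤ left.length then right else left
  (List.range maxl.length).foldl (fun largest i =>
    let value := maxl.getD i 0
    (List.range minl.length).foldl (fun largest j =>
      if minl.getD j 0 = value then
        let candidate := find_sequence i j maxl minl
        if candidate > largest then candidate else largest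
      else largest) largest) 0

-- ===== PORT B =====
-- state of the outer fold: (answer, below); state of the inner fold: (answer, row)
def largest_common_sublist_sum_alt (left : List Int) (right : List Int) : Int :=
  (left.reverse.foldl (fun (st : Int × List Int) (x : Int) =>
      let inner := (right.zip (st.2.drop 1)).foldl
        (fun (p : Int × List Int) (yb : Int × Int) =>
          let v := if x = yb.1 then max 0 (x + yb.2) else 0
          (if v > p.1 then v else p.1, p.2 ++ [v]))
        (st.1, ([] : List Int))
      (inner.1, inner.2 ++ [0]))
    (0, List.replicate (right.length + 1) 0)).1

-- ===== PRECONDITION & SPEC =====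
def Spec_largest_common_sublist_sum (left : List Int) (right : List Int) (out : Int) : Prop := out = largest_common_sublist_sum_alt left right
instance (left : List Int) (right : List Int) (out : Int) : Decidable (Spec_largest_common_sublist_sum left right out) := by unfold Spec_largest_common_sublist_sum; infer_instance

-- ===== CLAIM (what is proved, stated in full; the proofs are below) =====
def Claim_equal_largest_common_sublist_sum : Prop := ∀ (left : List Int) (right : List Int), Dom_largest_common_sublist_sum left right → Spec_largest_common_sublist_sum left right (largest_common_sublist_sum left right)

-- ===== LEMMAS AND PROOFS =====

-- fs a b i j : the value of find_sequence i j a b — the best (clamped at 0)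
-- prefix sum of the maximal matching diagonal run starting at (i, j).
def fs (a b : List Int) (i j : Nat) : Int :=
  if i < a.length ∧ j < b.length ∧ a.getD i 0 = b.getD j 0 then
    max 0 (a.getD i 0 + fs a b (i + 1) (j + 1))
  else 0
termination_by a.length - i
decreasing_by omega

theorem fs_nonneg (a b : List Int) (i j : Nat) : 0 ≤ fs a b i j := by
  rw [fs]; split
  · exact le_max_left _ _
  · exact le_refl 0

def F (l : List Int) : Int := l.foldl max 0

def rowMax (a b : List Int) (i : Nat) : Int := F ((List.range b.length).map (fs a b i))

def bigMax (a b : List Int) : Int := F ((List.range a.length).map (rowMax a b))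

theorem le_foldl_max (l : List Int) : ∀ c : Int, c ≤ l.foldl max c := by
  induction l with
  | nil => intro c; simp
  | cons y t ih =>
    intro c
    calc c ≤ max c y := le_max_left _ _
    _ ≤ t.foldl max (max c y) := ih _

theorem F_nonneg (l : List Int) : 0 ≤ F l := le_foldl_max l 0

theorem foldl_max_init (l : List Int) : ∀ c : Int, 0 ≤ c → (∀ x ∈ l, 0 ≤ x) →
    l.foldl max c = max c (F l) := by
  induction l with
  | nil => intro c hc _; simp only [List.foldl_nil, F]; omega
  | cons y t ih =>
    intro c hc h
    have hy : 0 ≤ y := h y (by simp)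
    have ht : ∀ x ∈ t, 0 ≤ x := fun x hx => h x (by simp [hx])
    simp only [F, List.foldl_cons]
    rw [ih (max c y) (by omega) ht, ih (max 0 y) (by omega) ht]
    omega

theorem F_append (l : List Int) (x : Int) : F (l ++ [x]) = max (F l) x := by
  simp [F, List.foldl_append]

-- ---------- A's loops compute bigMax ----------

theorem findSeqLoop_eq (maxl minl : List Int) (i j : Nat) (s h : Int) (hsh : s ≤ h) :
    findSeqLoop i j maxl minl s h = max h (s + fs maxl minl i j) := by
  rw [findSeqLoop, fs]
  split
  · rw [findSeqLoop_eq maxl minl (i + 1) (j + 1) (s + maxl.getD i 0)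
      (max (s + maxl.getD i 0) h) (le_max_left _ _)]
    have := fs_nonneg maxl minl (i + 1) (j + 1)
    omega
  · omega
termination_by maxl.length - i
decreasing_by omega

theorem find_sequence_eq (i j : Nat) (maxl minl : List Int) :
    find_sequence i j maxl minl = fs maxl minl i j := by
  have h1 := findSeqLoop_eq maxl minl i j 0 0 (le_refl 0)
  have h2 := fs_nonneg maxl minl i j
  rw [find_sequence, h1]
  omega

theorem foldl_max_map (g : Nat → Int) (l : List Nat) (c : Int) :
    l.foldl (fun acc j => max acc (g j)) c = (l.map g).foldl max c := by
  rw [List.foldl_map]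

-- A's inner loop body, named (definitionally equal to the port's lambda)
def aInner (a b : List Int) (i : Nat) (largest : Int) (j : Nat) : Int :=
  if b.getD j 0 = a.getD i 0 then
    let candidate := find_sequence i j a b
    if candidate > largest then candidate else largest
  else largest

def aOuter (a b : List Int) (largest : Int) (i : Nat) : Int :=
  (List.range b.length).foldl (aInner a b i) largest

theorem aInner_eq (a b : List Int) (i : Nat) (acc : Int) (j : Nat) (hacc : 0 ≤ acc) :
    aInner a b i acc j = max acc (fs a b i j) := by
  unfold aInner
  simp only [find_sequence_eq]
  by_cases hm : b.getD j 0 = a.getD i 0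
  · rw [if_pos hm]; omega
  · rw [if_neg hm]
    have hz : fs a b i j = 0 := by
      rw [fs, if_neg]; intro hcon; exact hm hcon.2.2.symm
    rw [hz]; omega

theorem A_inner_fold (a b : List Int) (i : Nat) :
    ∀ (l : List Nat) (acc : Int), 0 ≤ acc →
    l.foldl (aInner a b i) acc = l.foldl (fun acc j => max acc (fs a b i j)) acc := by
  intro l
  induction l with
  | nil => intro acc _; rfl
  | cons j t ih =>
    intro acc hacc
    rw [List.foldl_cons, List.foldl_cons, aInner_eq a b i acc j hacc]
    exact ih _ (le_trans hacc (le_max_left _ _))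

theorem A_outer_fold (a b : List Int) :
    ∀ (l : List Nat) (acc : Int), 0 ≤ acc →
    l.foldl (aOuter a b) acc = l.foldl (fun acc i => max acc (rowMax a b i)) acc := by
  intro l
  induction l with
  | nil => intro acc _; rfl
  | cons i t ih =>
    intro acc hacc
    rw [List.foldl_cons, List.foldl_cons]
    have h1 : aOuter a b acc i = max acc (rowMax a b i) := by
      unfold aOuter
      rw [A_inner_fold a b i _ acc hacc, foldl_max_map,
        foldl_max_init _ acc hacc
          (by intro x hx; simp only [List.mem_map] at hx
              obtain ⟨j, _, rfl⟩ := hx; exact fs_nonneg _ _ _ _)]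
      rfl
    rw [h1]
    exact ih _ (le_trans hacc (le_max_left _ _))

theorem A_eq_bigMax (a b : List Int) :
    (List.range a.length).foldl (aOuter a b) 0 = bigMax a b := by
  rw [A_outer_fold a b _ 0 (le_refl 0), foldl_max_map]
  rfl

-- ---------- symmetry: bigMax a b = bigMax b a ----------

theorem fs_symm (a b : List Int) (i j : Nat) : fs a b i j = fs b a j i := by
  conv_lhs => rw [fs]
  conv_rhs => rw [fs]
  by_cases hc : i < a.length ∧ j < b.length ∧ a.getD i 0 = b.getD j 0
  · rw [if_pos hc, if_pos ⟨hc.2.1, hc.1, hc.2.2.symm⟩, hc.2.2,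
      fs_symm a b (i + 1) (j + 1)]
  · rw [if_neg hc, if_neg (fun h => hc ⟨h.2.1, h.1, h.2.2.symm⟩)]
termination_by a.length - i
decreasing_by omega

theorem F_map_zero (m : Nat) : F ((List.range m).map (fun _ => (0:Int))) = 0 := by
  induction m with
  | zero => rfl
  | succ k ih =>
    rw [List.range_succ]
    simp only [List.map_append, List.map_cons, List.map_nil]
    rw [F_append, ih]
    simp

theorem F_map_pair (g h : Nat → Int) (m : Nat) :
    F ((List.range m).map (fun j => max (g j) (h j)))
      = max (F ((List.range m).map g)) (F ((List.range m).map h)) := by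
  induction m with
  | zero => simp [F]
  | succ k ih =>
    rw [List.range_succ]
    simp only [List.map_append, List.map_cons, List.map_nil]
    rw [F_append, F_append, F_append, ih]
    omega

theorem F_swap (f : Nat → Nat → Int) (n m : Nat) :
    F ((List.range n).map (fun i => F ((List.range m).map (f i))))
      = F ((List.range m).map (fun j => F ((List.range n).map (fun i => f i j)))) := by
  induction n with
  | zero =>
    simp only [List.range_zero, List.map_nil]
    rw [show (fun (j : Nat) => F ([] : List Int)) = (fun _ => (0:Int)) from rfl, F_map_zero]
    rfl
  | succ k ih =>
    rw [List.range_succ]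
    simp only [List.map_append, List.map_cons, List.map_nil]
    rw [F_append, ih,
      ← F_map_pair (fun j => F ((List.range k).map (fun i => f i j))) (fun j => f k j) m]
    congr 1
    refine List.map_congr_left (fun j _ => ?_)
    rw [F_append]

theorem bigMax_symm (a b : List Int) : bigMax a b = bigMax b a := by
  unfold bigMax rowMax
  rw [F_swap (fun i j => fs a b i j) a.length b.length]
  congr 1
  refine List.map_congr_left (fun j _ => ?_)
  congr 1
  exact List.map_congr_left (fun i _ => fs_symm a b i j)

-- ---------- B computes bigMax ----------

theorem fs_shift (x : Int) (xs b : List Int) (i j : Nat) :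
    fs (x :: xs) b (i + 1) j = fs xs b i j := by
  conv_lhs => rw [fs]
  conv_rhs => rw [fs]
  simp only [List.length_cons, List.getD_cons_succ, Nat.add_lt_add_iff_right]
  by_cases hc : i < xs.length ∧ j < b.length ∧ xs.getD i 0 = b.getD j 0
  · rw [if_pos hc, if_pos hc, fs_shift x xs b (i + 1) (j + 1)]
  · rw [if_neg hc, if_neg hc]
termination_by xs.length - i
decreasing_by omega

theorem rowMax_shift (x : Int) (xs b : List Int) (i : Nat) :
    rowMax (x :: xs) b (i + 1) = rowMax xs b i := by
  unfold rowMax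
  congr 1
  exact List.map_congr_left (fun j _ => fs_shift x xs b i j)

theorem rowMax_nonneg (a b : List Int) (i : Nat) : 0 ≤ rowMax a b i := F_nonneg _

theorem bigMax_nonneg (a b : List Int) : 0 ≤ bigMax a b := F_nonneg _

theorem F_cons (y : Int) (l : List Int) (hy : 0 ≤ y) (hl : ∀ x ∈ l, 0 ≤ x) :
    F (y :: l) = max y (F l) := by
  show (y :: l).foldl max 0 = max y (F l)
  rw [List.foldl_cons, foldl_max_init l (max 0 y) (by omega) hl]
  omega

theorem bigMax_cons (x : Int) (xs b : List Int) :
    bigMax (x :: xs) b = max (rowMax (x :: xs) b 0) (bigMax xs b) := by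
  unfold bigMax
  rw [List.length_cons, List.range_succ_eq_map]
  simp only [List.map_cons, List.map_map]
  rw [show ((List.range xs.length).map (rowMax (x :: xs) b ∘ Nat.succ))
      = (List.range xs.length).map (rowMax xs b) from
    List.map_congr_left (fun i _ => rowMax_shift x xs b i)]
  exact F_cons _ _ (rowMax_nonneg _ _ _)
    (by intro v hv; simp only [List.mem_map] at hv
        obtain ⟨i, _, rfl⟩ := hv; exact rowMax_nonneg _ _ _)

-- B's two lambdas, named for the proofs (definitionally equal to the port's lambdas)
def bStepIn (x : Int) (p : Int × List Int) (yb : Int × Int) : Int × List Int :=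
  let v := if x = yb.1 then max 0 (x + yb.2) else 0
  (if v > p.1 then v else p.1, p.2 ++ [v])

def bStepOut (right : List Int) (st : Int × List Int) (x : Int) : Int × List Int :=
  let inner := (right.zip (st.2.drop 1)).foldl (bStepIn x) (st.1, ([] : List Int))
  (inner.1, inner.2 ++ [0])

theorem B_unfold (left right : List Int) :
    largest_common_sublist_sum_alt left right
      = (left.reverse.foldl (bStepOut right) (0, List.replicate (right.length + 1) 0)).1 := rfl

theorem B_inner (x : Int) (b below : List Int) (f : Nat → Int)
    (hlen : below.length = b.length + 1)
    (hf : ∀ j, j < b.length → f j = if x = b.getD j 0 then max 0 (x + below.getD (j+1) 0) else 0) :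
    ∀ (k j : Nat), b.length - j = k → ∀ (ans : Int) (row : List Int),
    ((b.drop j).zip (below.drop (j+1))).foldl (bStepIn x) (ans, row)
    = (((List.range' j k).map f).foldl max ans, row ++ (List.range' j k).map f) := by
  intro k
  induction k with
  | zero =>
    intro j hj ans row
    have hd : b.drop j = [] := by
      rw [List.drop_eq_nil_iff]; omega
    simp [hd, List.range']
  | succ k ih =>
    intro j hj ans row
    have hjb : j < b.length := by omega
    have hjb2 : j + 1 < below.length := by omega
    have h1 : b.drop j = b.getD j 0 :: b.drop (j + 1) := by
      rw [List.getD_eq_getElem _ _ hjb]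
      exact List.drop_eq_getElem_cons hjb
    have h2 : below.drop (j + 1) = below.getD (j + 1) 0 :: below.drop (j + 2) := by
      rw [List.getD_eq_getElem _ _ hjb2]
      exact List.drop_eq_getElem_cons hjb2
    rw [h1, h2, List.zip_cons_cons, List.foldl_cons]
    have hv' : (if x = b.getD j 0 then max 0 (x + below.getD (j + 1) 0) else 0) = f j :=
      (hf j hjb).symm
    have hv : bStepIn x (ans, row) (b.getD j 0, below.getD (j + 1) 0)
        = (max ans (f j), row ++ [f j]) := by
      simp only [bStepIn]
      rw [hv']
      rw [show (if f j > ans then f j else ans) = max ans (f j) from by omega]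
    rw [hv, ih (j + 1) (by omega) (max ans (f j)) (row ++ [f j])]
    rw [List.range'_succ, List.map_cons, List.foldl_cons, List.append_assoc]
    rfl

theorem B_outer (b : List Int) (a : List Int) :
    ∀ (ans : Int), 0 ≤ ans →
    a.foldr (fun x st => bStepOut b st x) (ans, List.replicate (b.length + 1) 0)
      = (max ans (bigMax a b), (List.range b.length).map (fs a b 0) ++ [0]) := by
  induction a with
  | nil =>
    intro ans hans
    simp only [List.foldr_nil]
    have h0 : bigMax ([] : List Int) b = 0 := rfl
    have hz : ∀ j : Nat, fs ([] : List Int) b 0 j = 0 := by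
      intro j; rw [fs, if_neg]; intro hcon; simp at hcon
    have hrow : (List.range b.length).map (fs ([] : List Int) b 0) ++ [0]
        = List.replicate (b.length + 1) (0:Int) := by
      rw [show (List.range b.length).map (fs ([] : List Int) b 0)
            = (List.range b.length).map (fun _ => (0:Int)) from
          List.map_congr_left (fun j _ => hz j)]
      rw [List.map_const', List.length_range, List.replicate_succ']
    rw [h0, hrow]
    congr 1
    omega
  | cons x xs ih =>
    intro ans hans
    rw [List.foldr_cons, ih ans hans]
    unfold bStepOut
    simp only
    have hlen : ((List.range b.length).map (fs xs b 0) ++ [0]).length = b.length + 1 := by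
      simp
    have hf : ∀ j, j < b.length → fs (x :: xs) b 0 j
        = if x = b.getD j 0 then
            max 0 (x + ((List.range b.length).map (fs xs b 0) ++ [(0:Int)]).getD (j+1) 0)
          else 0 := by
      intro j hj
      rw [fs]
      have hcond : (0 < (x :: xs).length ∧ j < b.length ∧ (x :: xs).getD 0 0 = b.getD j 0)
          ↔ (x = b.getD j 0) := by
        simp only [List.length_cons, List.getD_cons_zero]
        constructor
        · rintro ⟨_, _, h⟩; exact h
        · intro h; exact ⟨by omega, hj, h⟩
      have hbelow : ((List.range b.length).map (fs xs b 0) ++ [(0:Int)]).getD (j+1) 0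
          = fs xs b 0 (j+1) := by
        by_cases hj1 : j + 1 < b.length
        · rw [List.getD_eq_getElem _ _ (by simp; omega)]
          rw [List.getElem_append_left (by simp; omega)]
          simp
        · have hjm : j + 1 = b.length := by omega
          have hfz : fs xs b 0 (j+1) = 0 := by
            rw [fs, if_neg]; intro hcon; omega
          rw [hfz, List.getD_eq_getElem _ _ (by simp; omega)]
          rw [List.getElem_append_right (by simp; omega)]
          simp [hjm]
      rw [hbelow]
      by_cases hx : x = b.getD j 0
      · rw [if_pos (hcond.mpr hx), if_pos hx]
        simp only [List.getD_cons_zero]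
        rw [show (0:Nat) + 1 = 1 from rfl, fs_shift x xs b 0 (j+1)]
      · rw [if_neg (fun h => hx (hcond.mp h)), if_neg hx]
    have hzip := B_inner x b ((List.range b.length).map (fs xs b 0) ++ [0])
      (fs (x :: xs) b 0) hlen hf b.length 0 (by omega) (max ans (bigMax xs b)) []
    simp only [List.drop_zero] at hzip
    rw [show ((List.range b.length).map (fs xs b 0) ++ [(0:Int)]).drop 1
          = ((List.range b.length).map (fs xs b 0) ++ [(0:Int)]).drop (0 + 1) from rfl] at *
    rw [hzip]
    rw [show List.range' 0 b.length = List.range b.length from List.range_eq_range'.symm]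
    rw [foldl_max_init _ _ (by have := bigMax_nonneg xs b; omega)
      (by intro v hv; simp only [List.mem_map] at hv
          obtain ⟨j, _, rfl⟩ := hv; exact fs_nonneg _ _ _ _)]
    rw [bigMax_cons]
    have : max (max ans (bigMax xs b)) (F ((List.range b.length).map (fs (x :: xs) b 0)))
        = max ans (max (rowMax (x :: xs) b 0) (bigMax xs b)) := by
      unfold rowMax; omega
    rw [this]
    simp

-- ===== VERDICT (by name: the statement is the Claim_ definition above) =====
theorem largest_common_sublist_sum_spec : Claim_equal_largest_common_sublist_sum := by
  intro left right _
  show largest_common_sublist_sum left right = largest_common_sublist_sum_alt left right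
  have hB : largest_common_sublist_sum_alt left right = bigMax left right := by
    rw [B_unfold, List.foldl_reverse]
    rw [show (fun (x : Int) (st : Int × List Int) => bStepOut right st x)
          = (fun x st => bStepOut right st x) from rfl]
    rw [B_outer right left 0 (le_refl 0)]
    have := bigMax_nonneg left right
    simp only
    omega
  rw [hB]
  have hA : largest_common_sublist_sum left right
      = (List.range (if left.length ≥ right.length then left else right).length).foldl
          (aOuter (if left.length ≥ right.length then left else right)
            (if right.length ≤ left.length then right else left)) 0 := rfl
  rw [hA]
  by_cases h : right.length ≤ left.length
  · rw [if_pos (ge_iff_le.mpr h), if_pos h]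
    exact A_eq_bigMax left right
  · rw [if_neg (fun hc => h (ge_iff_le.mp hc)), if_neg h]
    rw [A_eq_bigMax right left]
    exact bigMax_symm right left
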